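-- pv_equiv track=rewrite | github.com/zq-zhan/Algorithm_updating | 202412二分算法/20241228二分答案/2-6有界数组中指定下标处的最大值.py | check
-- ===== SOURCE A (Python) =====
-- def check(n, index, maxSum, mid):
-- 	ans = mid
-- 	temp = mid
-- 	for i in range(index + 1, n):
-- 		# ans += max(temp - 1, 1)
-- 		temp = max(temp - 1, 1)
-- 		ans += temp
-- 	temp = mid
-- 	for j in range(index - 1, -1, -1):
-- 		temp = max(temp - 1, 1)
-- 		ans += temp
-- 	return ans <= maxSum
-- ===== SOURCE B (Python) =====
-- def _side(mid, k):
-- 	# sum of max(mid - i, 1) for i = 1..k, in closed form: the first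
-- 	# j = clamp(mid - 2, 0, k) terms form the arithmetic run mid-1, mid-2, ...,
-- 	# the remaining k - j terms are all 1.
-- 	j = max(0, min(k, mid - 2))
-- 	return j * mid - j * (j + 1) // 2 + (k - j)
--
-- def check(n, index, maxSum, mid):
-- 	right = max(n - index - 1, 0)
-- 	left = max(index, 0)
-- 	return mid + _side(mid, right) + _side(mid, left) <= maxSum
-- ===== Notes on version B (the rewrite author's own statement) =====
-- stated objective: faster
-- what changed: Replaced the two O(n) clamped-decrement loops by a closed-form arithmetic-series sum (clamped at 1) for each side of the peak.
import Mathlib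
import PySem

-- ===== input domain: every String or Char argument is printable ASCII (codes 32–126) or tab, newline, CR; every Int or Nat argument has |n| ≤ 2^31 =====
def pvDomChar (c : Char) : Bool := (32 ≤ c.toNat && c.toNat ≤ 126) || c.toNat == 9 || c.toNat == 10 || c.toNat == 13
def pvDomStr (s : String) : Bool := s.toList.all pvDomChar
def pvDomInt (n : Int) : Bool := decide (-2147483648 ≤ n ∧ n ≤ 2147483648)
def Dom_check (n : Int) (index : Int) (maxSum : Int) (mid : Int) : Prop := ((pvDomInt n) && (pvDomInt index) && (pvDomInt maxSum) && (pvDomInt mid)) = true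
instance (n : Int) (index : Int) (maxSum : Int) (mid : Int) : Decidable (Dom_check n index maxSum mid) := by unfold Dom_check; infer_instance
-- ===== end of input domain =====

-- B replaces A's two O(n) clamped-decrement loops by a closed-form arithmetic-series
-- sum for each side of the peak (objective: faster, O(1) vs O(n)).

-- ===== PORT A =====
-- one step of A's loop body: temp = max(temp-1,1); ans += temp  (state = (ans, temp))
def loopA (l : List Int) (ans temp : Int) : Int × Int :=
  l.foldl (fun (p : Int × Int) _ => (p.1 + max (p.2 - 1) 1, max (p.2 - 1) 1)) (ans, temp)

def check (n : Int) (index : Int) (maxSum : Int) (mid : Int) : Bool :=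
  decide ((loopA (PySem.List.pyRange (index - 1) (-1) (-1))
    (loopA (PySem.List.pyRange (index + 1) n 1) mid mid).1 mid).1 ≤ maxSum)

-- ===== PORT B =====
def sideSum (mid k : Int) : Int :=
  let j := max 0 (min k (mid - 2))
  j * mid - PySem.Int.floordiv (j * (j + 1)) 2 + (k - j)

def check_alt (n : Int) (index : Int) (maxSum : Int) (mid : Int) : Bool :=
  decide (mid + sideSum mid (max (n - index - 1) 0) + sideSum mid (max index 0) ≤ maxSum)

-- ===== PRECONDITION & SPEC =====
def Spec_check (n : Int) (index : Int) (maxSum : Int) (mid : Int) (out : Bool) : Prop := out = check_alt n index maxSum mid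
instance (n : Int) (index : Int) (maxSum : Int) (mid : Int) (out : Bool) : Decidable (Spec_check n index maxSum mid out) := by unfold Spec_check; infer_instance

-- ===== CLAIM (what is proved, stated in full; the proofs are below) =====
def Claim_equal_check : Prop := ∀ (n : Int) (index : Int) (maxSum : Int) (mid : Int), Dom_check n index maxSum mid → Spec_check n index maxSum mid (check n index maxSum mid)

-- ===== LEMMAS AND PROOFS =====

-- sum added by A's loop when run for k iterations from clamp value `temp`
def S (temp : Int) : Nat → Int
  | 0 => 0
  | Nat.succ k => max (temp - 1) 1 + S (max (temp - 1) 1) k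

theorem foldl_loop_eq (l : List Int) (ans temp : Int) :
    (loopA l ans temp).1 = ans + S temp l.length := by
  induction l generalizing ans temp with
  | nil => simp [S, loopA]
  | cons x xs ih => simp [loopA, List.foldl, S] at ih ⊢; rw [ih]; ring

theorem S_closed (k : Nat) : ∀ temp : Int, S temp k = sideSum temp (k : Int) := by
  induction k with
  | zero => intro temp; simp [S, sideSum]
  | succ k ih =>
    intro temp
    rw [S, ih]
    unfold sideSum
    by_cases h : temp ≤ 2
    · have h1 : max (temp - 1) 1 = 1 := by omega
      rw [h1]
      have h2 : max 0 (min ((k : Int) + 1) (temp - 2)) = 0 := by omega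
      have h3 : max 0 (min (k : Int) (-1 : Int)) = 0 := by omega
      push_cast
      rw [h2, h3]
      simp [PySem.Int.floordiv]
      omega
    · have h1 : max (temp - 1) 1 = temp - 1 := by omega
      rw [h1]
      set j' := max 0 (min (k : Int) (temp - 1 - 2)) with hj'
      have hj'0 : 0 ≤ j' := le_max_left _ _
      have h2 : max 0 (min ((k : Int) + 1) (temp - 2)) = j' + 1 := by omega
      push_cast
      rw [h2]
      have htri : PySem.Int.floordiv ((j' + 1) * (j' + 1 + 1)) 2
          = PySem.Int.floordiv (j' * (j' + 1)) 2 + (j' + 1) := by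
        have h1' : (j' + 1) * (j' + 1 + 1) = j' * (j' + 1) + (j' + 1) * 2 := by ring
        simp only [PySem.Int.floordiv, h1']
        rw [Int.add_mul_fdiv_right _ _ (by norm_num)]
      rw [htri]
      ring

-- ===== VERDICT (by name: the statement is the Claim_ definition above) =====
theorem check_spec : Claim_equal_check := by
  intro n index maxSum mid _
  unfold Spec_check check check_alt
  rw [foldl_loop_eq, foldl_loop_eq,
    PySem.List.length_pyRange_one, PySem.List.length_pyRange_neg_one,
    S_closed, S_closed]
  have h1 : (((n - (index + 1)).toNat : Int)) = max (n - index - 1) 0 := by omega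
  have h2 : (((index - 1 - (-1)).toNat : Int)) = max index 0 := by omega
  rw [h1, h2]
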